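-- pv_equiv track=rewrite | github.com/wazuh/wazuh | tools/policy-migration/refactor_regex.py | _escape_literal_quantifiers
-- ===== SOURCE A (Python) =====
-- from typing import List, Tuple, Set, Optional
--
-- _QUANTIFIER_PREV_ALLOWED = set(['w', 'd', 's', 't', 'p', 'W', 'D', 'S', '.'])
--
-- def _escape_literal_quantifiers(payload: str, quote_char: Optional[str]) -> str:
--     """Escape literal '*' and '+' that old engine treated as literals.
--     Old engine: '*' or '+' is a quantifier only if preceded by one of: \\w, \\d, \\s, \\t, \\p, \\W, \\D, \\S, or \\. .
--     Otherwise it's literal and must be escaped for PCRE2.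
--     Quote-aware escaping: double-quoted -> prefix with '\\', single/unquoted -> prefix with '\'.
--     """
--     out: List[str] = []
--     i = 0
--     n = len(payload)
--     is_double = (quote_char == '"')
--
--     def prev_token_allows_quantifier(idx: int) -> bool:
--         # Check immediate previous escaped token: \\x (single/unquoted) or \\\\x (double-quoted), where x in allowed set.
--         if idx <= 0:
--             return False
--         if quote_char == '"':
--             # Expect two backslashes before token char
--             if idx - 3 >= 0 and payload[idx - 3] == '\\' and payload[idx - 2] == '\\' and payload[idx - 1] in _QUANTIFIER_PREV_ALLOWED:
--                 return True
--         else: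
--             if idx - 2 >= 0 and payload[idx - 2] == '\\' and payload[idx - 1] in _QUANTIFIER_PREV_ALLOWED:
--                 return True
--         return False
--
--     while i < n:
--         ch = payload[i]
--         if ch in ('*', '+'):
--             if prev_token_allows_quantifier(i):
--                 out.append(ch)
--             else:
--                 out.append('\\\\' + ch if is_double else '\\' + ch)
--             i += 1
--             continue
--         out.append(ch)
--         i += 1
--     return ''.join(out)
-- ===== SOURCE B (Python) =====
-- _ALLOWED = 'wdstpWDS.'
--
-- def _escape_literal_quantifiers(payload, quote_char):
--     """Two-stage tokenizer: (1) parse the payload into tokens -- an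
--     'escaped class' token (backslash(es) + allowed char) or a single char;
--     (2) map over the token stream, escaping a '*'/'+' token unless the
--     previous token is an escaped-class token.  No positional lookbehind."""
--     is_double = (quote_char == '"')
--     k = 3 if is_double else 2            # length of an escaped-class token
--     bs = '\\' * (k - 1)
--     # stage 1: tokenize
--     tokens = []
--     i, n = 0, len(payload)
--     while i < n:
--         if i + k <= n and payload[i:i + k - 1] == bs and payload[i + k - 1] in _ALLOWED:
--             tokens.append(payload[i:i + k])
--             i += k
--         else:
--             tokens.append(payload[i])
--             i += 1
--     # stage 2: escape quantifier tokens not preceded by an escaped-class token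
--     esc = '\\\\' if is_double else '\\'
--     res = []
--     prev_is_class = False
--     for t in tokens:
--         if t in ('*', '+') and not prev_is_class:
--             res.append(esc + t)
--         else:
--             res.append(t)
--         prev_is_class = (len(t) == k)
--     return ''.join(res)
-- ===== Notes on version B (the rewrite author's own statement) =====
-- stated objective: alternative
-- what changed: Replaces A's single index loop with positional lookbehind (payload[i-1..i-3]) by a two-stage tokenizer: stage 1 parses the payload into tokens (escaped-class tokens '\x'/'\\x' vs single characters), stage 2 maps over the token stream escaping */+ tokens whose predecessor is not an escaped-class token.
import Mathlib
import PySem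

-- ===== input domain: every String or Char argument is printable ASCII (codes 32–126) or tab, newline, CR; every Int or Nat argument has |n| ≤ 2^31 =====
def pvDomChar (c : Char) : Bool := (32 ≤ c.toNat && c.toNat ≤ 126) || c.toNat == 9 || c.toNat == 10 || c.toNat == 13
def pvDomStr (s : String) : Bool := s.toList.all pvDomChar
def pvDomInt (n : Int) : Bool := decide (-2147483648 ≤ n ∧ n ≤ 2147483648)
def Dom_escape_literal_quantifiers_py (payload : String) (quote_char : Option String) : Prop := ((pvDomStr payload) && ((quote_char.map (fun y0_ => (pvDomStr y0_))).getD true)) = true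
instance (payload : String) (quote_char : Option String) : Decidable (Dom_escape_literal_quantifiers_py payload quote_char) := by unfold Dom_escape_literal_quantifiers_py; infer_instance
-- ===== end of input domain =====

-- B replaces A's index loop with positional lookbehind by a two-stage tokenizer:
-- parse into tokens (escaped-class vs single char), then map over the token stream
-- (alternative decomposition, same cost).

-- ===== PORT A =====
-- _QUANTIFIER_PREV_ALLOWED (a Python set of single characters)
def pvQuantifierPrevAllowed : List Char := PySem.Set.ofList ['w', 'd', 's', 't', 'p', 'W', 'D', 'S', '.']

-- helper prev_token_allows_quantifier (idx is the Nat loop index i, so idx <= 0 means idx = 0)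
def pvA_prev (payload : List Char) (quote_char : Option String) (idx : Nat) : Bool :=
  if idx = 0 then false
  else if quote_char == some "\"" then
    -- idx - 3 >= 0 and payload[idx-3] == '\\' and payload[idx-2] == '\\' and payload[idx-1] in allowed
    decide (3 ≤ idx) && (payload.getD (idx - 3) ' ' == '\\') &&
      (payload.getD (idx - 2) ' ' == '\\') && pvQuantifierPrevAllowed.contains (payload.getD (idx - 1) ' ')
  else
    decide (2 ≤ idx) && (payload.getD (idx - 2) ' ' == '\\') &&
      pvQuantifierPrevAllowed.contains (payload.getD (idx - 1) ' ')

-- the while loop; 'out' is the returned list, built by the appends of each iteration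
def pvA_loop (payload : List Char) (quote_char : Option String) (is_double : Bool) (i : Nat) : List Char :=
  if h : i < payload.length then
    let ch := payload[i]
    (if ch == '*' || ch == '+' then
       (if pvA_prev payload quote_char i then [ch]
        else if is_double then ['\\', '\\', ch] else ['\\', ch])
     else [ch]) ++ pvA_loop payload quote_char is_double (i + 1)
  else []
termination_by payload.length - i

def escape_literal_quantifiers_py (payload : String) (quote_char : Option String) : String :=
  String.mk (pvA_loop payload.toList quote_char (quote_char == some "\"") 0)

-- ===== PORT B =====
def pvAllowedB : List Char := ['w', 'd', 's', 't', 'p', 'W', 'D', 'S', '.']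

-- k = 3 if is_double else 2 (length of an escaped-class token)
def pvK (dbl : Bool) : Nat := if dbl then 3 else 2

-- the tokenizer's guard: i + k <= n and payload[i:i+k-1] == '\\'*(k-1) and payload[i+k-1] in _ALLOWED
-- (the slice payload[i:i+k-1] with nonneg in-range bounds is exactly (cs.drop i).take (k-1))
def pvTokCond (k : Nat) (cs : List Char) (i : Nat) : Bool :=
  decide (i + k ≤ cs.length) && ((cs.drop i).take (k - 1) == List.replicate (k - 1) '\\') &&
    pvAllowedB.contains (cs.getD (i + k - 1) ' ')

-- stage 1: the tokenizing while loop (token = payload[i:i+k], i.e. (cs.drop i).take k)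
def pvTokB (dbl : Bool) (cs : List Char) (i : Nat) : List (List Char) :=
  if h : i < cs.length then
    if pvTokCond (pvK dbl) cs i then
      ((cs.drop i).take (pvK dbl)) :: pvTokB dbl cs (i + pvK dbl)
    else
      [cs[i]] :: pvTokB dbl cs (i + 1)
  else []
termination_by cs.length - i
decreasing_by
  · have : 2 ≤ pvK dbl := by cases dbl <;> simp [pvK]
    omega
  · omega

-- stage 2: the for loop over tokens, carrying prev_is_class = (len(t) == k)
def pvEmitB (k : Nat) (esc : List Char) : Bool → List (List Char) → List Char
  | _, [] => []
  | prev, t :: ts =>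
    (if (t == ['*'] || t == ['+']) && !prev then esc ++ t else t) ++
      pvEmitB k esc (t.length == k) ts

def escape_literal_quantifiers_py_alt (payload : String) (quote_char : Option String) : String :=
  let dbl := quote_char == some "\""
  String.mk (pvEmitB (pvK dbl) (if dbl then ['\\', '\\'] else ['\\']) false
    (pvTokB dbl payload.toList 0))

-- ===== PRECONDITION & SPEC =====
def Spec_escape_literal_quantifiers_py (payload : String) (quote_char : Option String) (out : String) : Prop := out = escape_literal_quantifiers_py_alt payload quote_char
instance (payload : String) (quote_char : Option String) (out : String) : Decidable (Spec_escape_literal_quantifiers_py payload quote_char out) := by unfold Spec_escape_literal_quantifiers_py; infer_instance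

-- ===== CLAIM (what is proved, stated in full; the proofs are below) =====
def Claim_equal_escape_literal_quantifiers_py : Prop := ∀ (payload : String) (quote_char : Option String), Dom_escape_literal_quantifiers_py payload quote_char → Spec_escape_literal_quantifiers_py payload quote_char (escape_literal_quantifiers_py payload quote_char)

-- ===== LEMMAS AND PROOFS =====

-- "an escaped-class token ends at position i": the tokenizer's guard held k back
def pvE (dbl : Bool) (cs : List Char) (i : Nat) : Bool :=
  decide (pvK dbl ≤ i) && pvTokCond (pvK dbl) cs (i - pvK dbl)

lemma pv_take_one (cs : List Char) (p : Nat) (h : p < cs.length) :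
    (cs.drop p).take 1 = [cs.getD p ' '] := by
  rw [List.drop_eq_getElem_cons h, List.take_succ_cons]
  simp [List.getD_eq_getElem?_getD, List.getElem?_eq_getElem h]

lemma pv_take_two (cs : List Char) (p : Nat) (h : p + 2 ≤ cs.length) :
    (cs.drop p).take 2 = [cs.getD p ' ', cs.getD (p + 1) ' '] := by
  rw [List.drop_eq_getElem_cons (by omega : p < cs.length), List.take_succ_cons,
    pv_take_one cs (p + 1) (by omega)]
  simp [List.getD_eq_getElem?_getD, List.getElem?_eq_getElem (by omega : p < cs.length)]

lemma pv_allowed_ne (c : Char) (h : pvAllowedB.contains c = true) :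
    (c == '\\') = false ∧ (c == '*') = false ∧ (c == '+') = false := by
  simp only [pvAllowedB, List.contains_cons, List.contains_nil, Bool.or_eq_true, beq_iff_eq] at h
  rcases h with h|h|h|h|h|h|h|h|h|h <;> first | (subst h; decide) | simp at h

-- A's lookbehind test equals "an escaped-class token ends here"
lemma pvA_prev_eq_E (cs : List Char) (qc : Option String) (i : Nat) (hi : i ≤ cs.length) :
    pvA_prev cs qc i = pvE (qc == some "\"") cs i := by
  by_cases hq : qc = some "\""
  · subst hq
    simp only [pvA_prev, pvE, pvTokCond, pvK, BEq.rfl, if_true]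
    by_cases h3 : 3 ≤ i
    · rw [if_neg (by omega), pv_take_two cs (i - 3) (by omega)]
      have e1 : i - 3 + 3 = i := by omega
      have e2 : i - 3 + 1 = i - 2 := by omega
      have e3 : i - 3 + 3 - 1 = i - 1 := by omega
      simp only [e1, e2, decide_eq_true h3, decide_eq_true hi]
      have hQA : pvQuantifierPrevAllowed = pvAllowedB := by decide
      simp only [List.replicate_succ, List.replicate_zero]
      rw [hQA, List.cons_beq_cons, List.cons_beq_cons]
      cases (cs.getD (i - 3) ' ' == '\\') <;>
        cases (cs.getD (i - 2) ' ' == '\\') <;>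
        cases pvAllowedB.contains (cs.getD (i - 1) ' ') <;> simp
    · rcases Nat.lt_or_ge i 1 with h|h
      · interval_cases i; simp
      · rw [if_neg (by omega)]
        simp [show ¬ (3:Nat) ≤ i from h3]
  · have hq2 : (qc == some "\"") = false := by simpa using hq
    simp only [pvA_prev, pvE, pvTokCond, pvK, hq2, Bool.false_eq_true, if_false]
    by_cases h2 : 2 ≤ i
    · rw [if_neg (by omega), pv_take_one cs (i - 2) (by omega)]
      have e1 : i - 2 + 2 = i := by omega
      have e3 : i - 2 + 2 - 1 = i - 1 := by omega
      simp only [e1, decide_eq_true h2, decide_eq_true hi]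
      have hQA : pvQuantifierPrevAllowed = pvAllowedB := by decide
      simp only [List.replicate_succ, List.replicate_zero]
      rw [hQA, List.cons_beq_cons]
      cases (cs.getD (i - 2) ' ' == '\\') <;>
        cases pvAllowedB.contains (cs.getD (i - 1) ' ') <;> simp
    · rcases Nat.lt_or_ge i 1 with h|h
      · interval_cases i; simp
      · rw [if_neg (by omega)]
        simp [show ¬ (2:Nat) ≤ i from h2]

-- main loop invariant: emitting B's tokens from boundary i, with
--   prev = "an escaped-class token ends at i", and no tokenizer guard holding at i-1
--   (nor, in double mode, at i-2), reproduces A's loop from index i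
lemma pv_main (cs : List Char) (qc : Option String) :
    ∀ (n i : Nat), cs.length - i = n → i ≤ cs.length →
    ∀ (prev : Bool), prev = pvE (qc == some "\"") cs i →
    (1 ≤ i → pvTokCond (pvK (qc == some "\"")) cs (i - 1) = false) →
    ((qc == some "\"") = true → 2 ≤ i → pvTokCond (pvK (qc == some "\"")) cs (i - 2) = false) →
    pvEmitB (pvK (qc == some "\"")) (if (qc == some "\"") then ['\\', '\\'] else ['\\']) prev
        (pvTokB (qc == some "\"") cs i)
      = pvA_loop cs qc (qc == some "\"") i := by
  intro n
  induction n using Nat.strong_induction_on with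
  | _ n ih =>
    intro i hn hi prev hprev hinv1 hinv2
    by_cases hlt : i < cs.length
    case neg =>
      rw [pvTokB, dif_neg hlt, pvA_loop, dif_neg hlt, pvEmitB]
    case pos =>
    set dbl := (qc == some "\"") with hdbl
    rw [pvTokB, dif_pos hlt, pvA_loop]
    simp only [dif_pos hlt]
    by_cases htc : pvTokCond (pvK dbl) cs i = true
    · -- escaped-class token taken
      rw [if_pos htc]
      have hk2 : 2 ≤ pvK dbl := by cases dbl <;> simp [pvK]
      have hbound : i + pvK dbl ≤ cs.length := by
        rcases Bool.and_eq_true .. |>.mp htc with ⟨h1, _⟩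
        rcases Bool.and_eq_true .. |>.mp h1 with ⟨hb, _⟩
        exact of_decide_eq_true hb
      have hcontains : pvAllowedB.contains (cs.getD (i + pvK dbl - 1) ' ') = true := by
        rcases Bool.and_eq_true .. |>.mp htc with ⟨_, h2⟩; exact h2
      have hslice : (cs.drop i).take (pvK dbl - 1) = List.replicate (pvK dbl - 1) '\\' := by
        rcases Bool.and_eq_true .. |>.mp htc with ⟨h1, _⟩
        rcases Bool.and_eq_true .. |>.mp h1 with ⟨_, hs⟩
        exact eq_of_beq hs
      rcases pv_allowed_ne _ hcontains with ⟨hne_bs, hne_star, hne_plus⟩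
      cases hd : dbl
      · -- single/unquoted: k = 2, the token is [cs[i], cs[i+1]], cs[i] = '\\', cs[i+1] allowed
        rw [hd] at htc hbound hcontains hslice hne_bs hne_star hne_plus ih hinv1 hinv2
        have hK : pvK false = 2 := rfl
        rw [hK] at htc hbound hcontains hslice hne_bs hne_star hne_plus ⊢
        have hc0 : cs.getD i ' ' = '\\' := by
          have h1 := hslice
          rw [show (2:Nat) - 1 = 1 from rfl, pv_take_one cs i (by omega)] at h1
          simpa using h1
        have hc0' : cs[i] = '\\' := by
          rw [← hc0]; simp [List.getD_eq_getElem?_getD, List.getElem?_eq_getElem hlt]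
        have hc1 : cs.getD (i + 1) ' ' = cs[i+1] := List.getD_eq_getElem cs ' ' (by omega)
        rw [show i + 2 - 1 = i + 1 from by omega, hc1] at hcontains hne_bs hne_star hne_plus
        have htok : (cs.drop i).take 2 = [cs[i], cs[i+1]] := by
          rw [pv_take_two cs i (by omega), hc1]
          simp [List.getD_eq_getElem?_getD, List.getElem?_eq_getElem hlt]
        rw [htok, pvEmitB]
        have hnotq : ([cs[i], cs[i+1]] == ['*'] || [cs[i], cs[i+1]] == ['+']) = false := by
          simp [List.cons_beq_cons]
        rw [hnotq]
        simp only [Bool.false_and, Bool.false_eq_true, if_false]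
        have ha0 : (cs[i] == '*' || cs[i] == '+') = false := by rw [hc0']; decide
        simp only [ha0]
        simp only [Bool.false_eq_true, if_false]
        rw [pvA_loop]
        simp only [dif_pos (by omega : i + 1 < cs.length)]
        have ha1 : (cs[i+1] == '*' || cs[i+1] == '+') = false := by
          rw [hne_star, hne_plus]; rfl
        split
        · rename_i hx
          exact absurd (ha1.symm.trans hx) Bool.false_ne_true
        simp only [List.cons_append, List.nil_append]
        congr 2
        refine ih (cs.length - (i + 2)) (by omega) (i + 2) rfl (by omega) _ ?_ ?_ ?_
        · simp [pvE, pvK, htc]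
        · -- no guard at i+1: it would need cs[i+1] = '\\', but cs[i+1] is an allowed char
          intro _
          rw [hK, show i + 2 - 1 = i + 1 from by omega, pvTokCond]
          by_cases hb3 : i + 1 + 2 ≤ cs.length
          · rw [show (2:Nat) - 1 = 1 from rfl, pv_take_one cs (i + 1) (by omega), hc1]
            simp [List.cons_beq_cons, hne_bs]
          · simp [decide_eq_false hb3]
        · intro hdd; cases hdd
      · -- double-quoted: k = 3, the token is [cs[i], cs[i+1], cs[i+2]]
        rw [hd] at htc hbound hcontains hslice hne_bs hne_star hne_plus ih hinv1 hinv2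
        have hK : pvK true = 3 := rfl
        rw [hK] at htc hbound hcontains hslice hne_bs hne_star hne_plus ⊢
        simp only [show (if (true = true) then (['\\','\\']:List Char) else ['\\']) = ['\\','\\'] from rfl]
        have hsl2 : (cs.drop i).take 2 = ['\\', '\\'] := by simpa using hslice
        rw [pv_take_two cs i (by omega)] at hsl2
        have hc0 : cs.getD i ' ' = '\\' := by
          have := congrArg (fun l => l.getD 0 ' ') hsl2; simpa using this
        have hc1 : cs.getD (i + 1) ' ' = '\\' := by
          have := congrArg (fun l => l.getD 1 ' ') hsl2; simpa using this
        have hc0' : cs[i] = '\\' := by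
          rw [← hc0]; simp [List.getD_eq_getElem?_getD, List.getElem?_eq_getElem hlt]
        have hc1' : cs[i+1] = '\\' := by
          rw [← hc1]
          simp [List.getD_eq_getElem?_getD, List.getElem?_eq_getElem (by omega : i + 1 < cs.length)]
        have hc2 : cs.getD (i + 2) ' ' = cs[i+2] := List.getD_eq_getElem cs ' ' (by omega)
        rw [show i + 3 - 1 = i + 2 from by omega, hc2] at hcontains hne_bs hne_star hne_plus
        have htok : (cs.drop i).take 3 = [cs[i], cs[i+1], cs[i+2]] := by
          rw [List.drop_eq_getElem_cons hlt, List.take_succ_cons,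
            pv_take_two cs (i + 1) (by omega), hc2]
          rw [List.getD_eq_getElem cs ' ' (by omega : i + 1 < cs.length)]
        rw [htok, pvEmitB]
        have hnotq : ([cs[i], cs[i+1], cs[i+2]] == ['*'] || [cs[i], cs[i+1], cs[i+2]] == ['+']) = false := by
          simp [List.cons_beq_cons]
        rw [hnotq]
        simp only [Bool.false_and, Bool.false_eq_true, if_false]
        have ha0 : (cs[i] == '*' || cs[i] == '+') = false := by rw [hc0']; decide
        simp only [ha0]
        simp only [Bool.false_eq_true, if_false]
        rw [pvA_loop]
        simp only [dif_pos (by omega : i + 1 < cs.length)]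
        have ha1 : (cs[i+1] == '*' || cs[i+1] == '+') = false := by rw [hc1']; decide
        simp only [ha1]
        simp only [Bool.false_eq_true, if_false]
        rw [pvA_loop]
        simp only [dif_pos (by omega : i + 2 < cs.length)]
        have ha2 : (cs[i+1+1] == '*' || cs[i+1+1] == '+') = false := by
          have h1 : (cs[i+1+1] == '*') = false := hne_star
          have h2 : (cs[i+1+1] == '+') = false := hne_plus
          rw [h1, h2]; rfl
        simp only [if_pos (trivial : True)]
        split
        · rename_i hx
          exact absurd (ha2.symm.trans hx) Bool.false_ne_true
        simp only [List.cons_append, List.nil_append]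
        congr 3
        refine ih (cs.length - (i + 3)) (by omega) (i + 3) rfl (by omega) _ ?_ ?_ ?_
        · simp [pvE, pvK, htc]
        · -- no guard at i+2: it would need cs[i+2] = '\\', but cs[i+2] is an allowed char
          intro _
          rw [hK, show i + 3 - 1 = i + 2 from by omega, pvTokCond]
          by_cases hb3 : i + 2 + 3 ≤ cs.length
          · rw [show (3:Nat) - 1 = 2 from rfl, pv_take_two cs (i + 2) (by omega), hc2]
            simp [List.replicate_succ, List.cons_beq_cons, hne_bs]
          · simp [decide_eq_false hb3]
        · -- no guard at i+1: its second backslash would be cs[i+2], an allowed char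
          intro _ _
          rw [hK, show i + 3 - 2 = i + 1 from by omega, pvTokCond]
          by_cases hb3 : i + 1 + 3 ≤ cs.length
          · rw [show (3:Nat) - 1 = 2 from rfl, pv_take_two cs (i + 1) (by omega)]
            have : cs.getD (i + 1 + 1) ' ' = cs[i+2] := hc2
            rw [this]
            simp [List.replicate_succ, List.cons_beq_cons, hne_bs]
          · simp [decide_eq_false hb3]
    · -- single-character token
      have hk2 : 2 ≤ pvK dbl := by cases dbl <;> simp [pvK]
      rw [if_neg htc, pvEmitB]
      have hprev' : prev = pvA_prev cs qc i := by
        rw [hprev, pvA_prev_eq_E cs qc i (by omega)]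
      have hq1 : ([cs[i]] == ['*'] || [cs[i]] == ['+']) = (cs[i] == '*' || cs[i] == '+') := by
        simp [List.cons_beq_cons]
      have hrec : pvEmitB (pvK dbl) (if dbl = true then ['\\', '\\'] else ['\\'])
            ([cs[i]].length == pvK dbl) (pvTokB dbl cs (i + 1))
          = pvA_loop cs qc dbl (i + 1) := by
        have hlen1 : ([cs[i]].length == pvK dbl) = false := by
          simp only [List.length_cons, List.length_nil, beq_eq_false_iff_ne]
          omega
        rw [hlen1]
        refine ih (cs.length - (i + 1)) (by omega) (i + 1) rfl (by omega) false ?_ ?_ ?_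
        · simp only [pvE]
          by_cases hki : pvK dbl ≤ i + 1
          · rcases Nat.eq_or_lt_of_le hk2 with h2 | h3
            · -- k = 2: the guard at i + 1 - k = i - 1 is excluded by the invariant
              rw [show i + 1 - pvK dbl = i - 1 from by omega]
              rcases Nat.lt_or_ge i 1 with h0 | h0
              · rw [show i - 1 = i from by omega, Bool.eq_false_iff.mpr htc]; simp
              · rw [hinv1 h0]; simp
            · -- k = 3: the guard at i + 1 - k = i - 2 is excluded by the invariant
              have hk3 : pvK dbl = 3 := by
                have : pvK dbl ≤ 3 := by cases dbl <;> simp [pvK]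
                omega
              have hdd : dbl = true := by
                cases hdx : dbl
                · rw [hdx] at hk3; simp [pvK] at hk3
                · rfl
              rcases Nat.lt_or_ge i 2 with h0 | h0
              · rw [show i + 1 - pvK dbl = 0 from by omega]
                rcases Nat.lt_or_ge i 1 with h00 | h00
                · rw [show (0:Nat) = i from by omega, Bool.eq_false_iff.mpr htc]; simp
                · rw [show (0:Nat) = i - 1 from by omega, hinv1 h00]; simp
              · rw [show i + 1 - pvK dbl = i - 2 from by omega, hinv2 hdd h0]; simp
          · simp [decide_eq_false hki]
        · intro _
          rw [show i + 1 - 1 = i from by omega]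
          exact Bool.eq_false_iff.mpr htc
        · intro hdd _
          by_cases hi1 : 1 ≤ i
          · rw [show i + 1 - 2 = i - 1 from by omega]; exact hinv1 hi1
          · rw [show i + 1 - 2 = i - 1 from by omega, show i - 1 = i from by omega]
            exact Bool.eq_false_iff.mpr htc
      by_cases hsq : (cs[i] == '*' || cs[i] == '+') = true
      · rw [hsq, hq1, hsq]
        rw [← hprev']
        cases hp : prev
        · simp only [Bool.not_false, Bool.and_true, if_true,
            Bool.false_eq_true, if_false]
          rw [hrec]
          cases hdx : dbl <;> simp
        · simp only [Bool.not_true, Bool.and_false, Bool.false_eq_true, if_false, if_true]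
          rw [hrec]
      · have hsq' : (cs[i] == '*' || cs[i] == '+') = false := by simpa using hsq
        rw [hsq', hq1, hsq']
        simp only [Bool.false_and, Bool.false_eq_true, if_false]
        rw [hrec]

-- ===== VERDICT (by name: the statement is the Claim_ definition above) =====
theorem escape_literal_quantifiers_py_spec : Claim_equal_escape_literal_quantifiers_py := by
  intro payload quote_char _
  unfold Spec_escape_literal_quantifiers_py escape_literal_quantifiers_py escape_literal_quantifiers_py_alt
  have h := pv_main payload.toList quote_char (payload.toList.length - 0) 0 rfl (by omega) false
    (by cases hq : (quote_char == some "\"") <;> simp [pvE, pvK]) (by omega) (by omega)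
  simp only [h]
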